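-- pv_equiv track=rewrite | github.com/raeez/chiral-bar-cobar | compute/lib/cy_sheaf_categories_engine.py | twisted_category_deformations
-- ===== SOURCE A (Python) =====
-- from typing import Dict, List, Optional, Tuple
--
-- def twisted_category_deformations(
--     hodge: Dict[Tuple[int, int], int],
--     dim: int,
-- ) -> Dict[str, int]:
--     """Deformation space of twisted derived categories D^b(X, alpha).
--
--     For a Brauer class alpha in Br(X), the twisted category D^b(X, alpha)
--     has Hochschild cohomology:
--         HH^*(D^b(X, alpha)) = HH^*(X) (as graded vector spaces)
--
--     The moduli of Brauer classes is controlled by: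
--         Br(X) -> H^2(X, O_X*) -> H^3(X, Z)
--
--     For K3: Br(K3) = (T_{K3})^vee / T_{K3} (transcendental lattice quotient).
--     For generic K3: rank T = 22 - rho, where rho = Picard number.
--
--     For K3 x E: the Brauer group decomposes by Kuenneth.
--     """
--     h02 = hodge.get((0, 2), 0)
--     b2 = sum(hodge.get((p, 2 - p), 0) for p in range(dim + 1))
--     b3 = sum(hodge.get((p, 3 - p), 0) for p in range(dim + 1))
--
--     return {
--         "formal_brauer_dim": h02,
--         "H2_rank": b2,
--         "H3_rank": b3,
--         "picard_bound": b2,  # upper bound on Picard number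
--     }
-- ===== SOURCE B (Python) =====
-- def twisted_category_deformations(hodge, dim):
--     b2 = 0
--     b3 = 0
--     for (p, q), v in hodge.items():
--         if 0 <= p <= dim:
--             s = p + q
--             if s == 2:
--                 b2 += v
--             elif s == 3:
--                 b3 += v
--     return {
--         "formal_brauer_dim": hodge.get((0, 2), 0),
--         "H2_rank": b2,
--         "H3_rank": b3,
--         "picard_bound": b2,
--     }
-- ===== Notes on version B (the rewrite author's own statement) =====
-- stated objective: faster
-- what changed: B replaces A's two key-driven range sums (probing the dict at (p,2-p) and (p,3-p) for every p in range(dim+1)) by a single entry-classifying pass over hodge.items() that adds each value to b2 or b3 when its key is in range and p+q is 2 or 3. Pre_ excludes association lists with duplicate (p,q) keys, which cannot arise from the Python dict argument.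
import Mathlib
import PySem

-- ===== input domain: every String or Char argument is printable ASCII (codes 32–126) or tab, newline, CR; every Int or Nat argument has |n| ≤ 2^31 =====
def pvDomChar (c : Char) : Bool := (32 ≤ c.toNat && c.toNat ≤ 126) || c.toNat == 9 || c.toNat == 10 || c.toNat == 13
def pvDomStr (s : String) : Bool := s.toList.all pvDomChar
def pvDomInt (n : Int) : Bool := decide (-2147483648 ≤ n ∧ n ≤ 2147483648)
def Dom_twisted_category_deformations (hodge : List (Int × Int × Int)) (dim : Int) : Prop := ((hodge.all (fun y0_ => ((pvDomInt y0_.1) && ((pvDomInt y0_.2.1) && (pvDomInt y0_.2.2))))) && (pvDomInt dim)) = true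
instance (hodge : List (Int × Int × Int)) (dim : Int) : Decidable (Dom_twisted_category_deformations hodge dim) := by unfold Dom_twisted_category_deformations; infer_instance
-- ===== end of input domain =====

-- B replaces A's two range-indexed sums (one dict probe per p in range(dim+1)) by a
-- single entry-classifying pass over the dict items: O(len(hodge)) instead of O(dim).

-- ===== PORT A =====
-- the hodge dict as a PySem.Dict keyed by the (p, q) pair
def hodgeDict (hodge : List (Int × Int × Int)) : PySem.Dict (Int × Int) Int :=
  PySem.Dict.mk (hodge.map (fun t => ((t.1, t.2.1), t.2.2)))

def twisted_category_deformations (hodge : List (Int × Int × Int)) (dim : Int) : List (String × Int) :=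
  let d := hodgeDict hodge
  let h02 := d.getD (0, 2) 0
  let b2 := (PySem.List.pyRange 0 (dim + 1) 1).foldl (fun acc p => acc + d.getD (p, 2 - p) 0) 0
  let b3 := (PySem.List.pyRange 0 (dim + 1) 1).foldl (fun acc p => acc + d.getD (p, 3 - p) 0) 0
  [("formal_brauer_dim", h02), ("H2_rank", b2), ("H3_rank", b3), ("picard_bound", b2)]

-- ===== PORT B =====
def twisted_category_deformations_alt (hodge : List (Int × Int × Int)) (dim : Int) : List (String × Int) :=
  let st := hodge.foldl (fun (acc : Int × Int) t =>
      if 0 ≤ t.1 ∧ t.1 ≤ dim then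
        if t.1 + t.2.1 = 2 then (acc.1 + t.2.2, acc.2)
        else if t.1 + t.2.1 = 3 then (acc.1, acc.2 + t.2.2)
        else acc
      else acc) (0, 0)
  let h02 := (hodgeDict hodge).getD (0, 2) 0
  [("formal_brauer_dim", h02), ("H2_rank", st.1), ("H3_rank", st.2), ("picard_bound", st.1)]

-- ===== PRECONDITION & SPEC =====
-- Pre_ excludes association lists with duplicate (p,q) keys: they cannot arise from
-- the Python dict argument, and on the list representation A's first-match lookup
-- vs B's summation of all matching entries are both accidental.
def Pre_twisted_category_deformations (hodge : List (Int × Int × Int)) (dim : Int) : Prop :=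
  (hodge.map (fun t => (t.1, t.2.1))).Nodup

instance (hodge : List (Int × Int × Int)) (dim : Int) : Decidable (Pre_twisted_category_deformations hodge dim) := by unfold Pre_twisted_category_deformations; infer_instance

def pvWitness_twisted_category_deformations : (List (Int × Int × Int)) × Int :=
  ([(0, 2, 1), (1, 1, 20), (2, 0, 1), (1, 2, 3)], 2)

def Spec_twisted_category_deformations (hodge : List (Int × Int × Int)) (dim : Int) (out : List (String × Int)) : Prop := out = twisted_category_deformations_alt hodge dim
instance (hodge : List (Int × Int × Int)) (dim : Int) (out : List (String × Int)) : Decidable (Spec_twisted_category_deformations hodge dim out) := by unfold Spec_twisted_category_deformations; infer_instance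

-- ===== CLAIM (what is proved, stated in full; the proofs are below) =====
def Claim_equal_twisted_category_deformations : Prop := ∀ (hodge : List (Int × Int × Int)) (dim : Int), Dom_twisted_category_deformations hodge dim → Pre_twisted_category_deformations hodge dim → Spec_twisted_category_deformations hodge dim (twisted_category_deformations hodge dim)

-- ===== LEMMAS AND PROOFS =====

-- summing an "indicator at p0" function over a duplicate-free index list
lemma sum_map_ite_point (R : List Int) (hR : R.Nodup) (p0 v0 : Int) (g : Int → Int)
    (hg : g p0 = 0) :
    (R.map (fun p => if p = p0 then v0 else g p)).sum
      = (if p0 ∈ R then v0 else 0) + (R.map g).sum := by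
  induction R with
  | nil => simp
  | cons r R ih =>
    rcases List.nodup_cons.mp hR with ⟨hr, hR'⟩
    by_cases h : r = p0
    · subst h
      have hmap : (R.map (fun p => if p = r then v0 else g p)).sum = (R.map g).sum := by
        apply congrArg
        apply List.map_congr_left
        intro p hp
        have : p ≠ r := fun e => hr (e ▸ hp)
        simp [this]
      rw [List.map_cons, List.sum_cons, if_pos rfl, hmap]
      simp [hg]
    · have hmem : p0 ∈ r :: R ↔ p0 ∈ R :=
        ⟨fun hm => (List.mem_cons.mp hm).resolve_left (fun e => h e.symm),
         fun hm => List.mem_cons_of_mem _ hm⟩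
      simp only [List.map_cons, List.sum_cons, if_neg h, ih hR', hmem]
      ring

-- A's range-sum over the dict equals the entry-classifying sum over the list
lemma rangeSum_eq_classify (l : List (Int × Int × Int)) (c dim : Int)
    (hnd : (l.map (fun t => (t.1, t.2.1))).Nodup) :
    ((PySem.List.pyRange 0 (dim + 1) 1).map
        (fun p => (hodgeDict l).getD (p, c - p) 0)).sum
      = (l.map (fun t =>
          if 0 ≤ t.1 ∧ t.1 ≤ dim ∧ t.1 + t.2.1 = c then t.2.2 else 0)).sum := by
  induction l with
  | nil =>
    have : ∀ p : Int, (hodgeDict []).getD (p, c - p) 0 = 0 := by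
      intro p; rfl
    simp [this]
  | cons t l ih =>
    rcases List.nodup_cons.mp hnd with ⟨hkey, hnd'⟩
    have hget : ∀ p : Int, (hodgeDict (t :: l)).getD (p, c - p) 0
        = if (p, c - p) = (t.1, t.2.1) then t.2.2 else (hodgeDict l).getD (p, c - p) 0 := by
      intro p
      simp only [hodgeDict, List.map_cons, PySem.Dict.getD_eq_get?_getD,
        PySem.Dict.get?_mk_cons, beq_iff_eq]
      by_cases h : (p, c - p) = (t.1, t.2.1)
      · rw [if_pos h.symm, if_pos h]
        rfl
      · rw [if_neg (fun e => h e.symm), if_neg h]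
    by_cases hq : t.2.1 = c - t.1
    · -- the key's q matches c - p: exactly the index p = t.1 can hit it
      have hcond : ∀ p : Int, ((p, c - p) = (t.1, t.2.1)) ↔ p = t.1 := by
        intro p
        constructor
        · intro h; exact (Prod.mk.injEq _ _ _ _ ▸ h).1
        · intro h; subst h; rw [hq]
      have hg0 : (hodgeDict l).getD (t.1, c - t.1) 0 = 0 := by
        have hnm : (t.1, t.2.1) ∉ (hodgeDict l).keys := by
          simpa [hodgeDict] using hkey
        have hnone := (PySem.Dict.get?_eq_none_iff_not_mem_keys _ _).mpr hnm
        rw [PySem.Dict.getD_eq_get?_getD, ← hq, hnone]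
        rfl
      calc ((PySem.List.pyRange 0 (dim + 1) 1).map
              (fun p => (hodgeDict (t :: l)).getD (p, c - p) 0)).sum
          = ((PySem.List.pyRange 0 (dim + 1) 1).map
              (fun p => if p = t.1 then t.2.2 else (hodgeDict l).getD (p, c - p) 0)).sum := by
            apply congrArg; apply List.map_congr_left; intro p _
            rw [hget p]; simp only [hcond p]
        _ = (if t.1 ∈ PySem.List.pyRange 0 (dim + 1) 1 then t.2.2 else 0)
              + ((PySem.List.pyRange 0 (dim + 1) 1).map
                  (fun p => (hodgeDict l).getD (p, c - p) 0)).sum := by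
            exact sum_map_ite_point _ (PySem.List.nodup_pyRange_one 0 (dim + 1)) _ _ _ hg0
        _ = (if 0 ≤ t.1 ∧ t.1 ≤ dim ∧ t.1 + t.2.1 = c then t.2.2 else 0)
              + (l.map (fun t =>
                  if 0 ≤ t.1 ∧ t.1 ≤ dim ∧ t.1 + t.2.1 = c then t.2.2 else 0)).sum := by
            rw [ih hnd']
            congr 1
            simp only [PySem.List.mem_pyRange_one]
            have : (0 ≤ t.1 ∧ t.1 < dim + 1) ↔ (0 ≤ t.1 ∧ t.1 ≤ dim ∧ t.1 + t.2.1 = c) := by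
              constructor
              · intro h; refine ⟨h.1, by omega, by omega⟩
              · intro h; exact ⟨h.1, by omega⟩
            simp only [this]
        _ = _ := by simp
    · -- the key's q never matches c - p: the head entry is invisible to the sum
      have hcond : ∀ p : Int, ¬ ((p, c - p) = (t.1, t.2.1)) := by
        intro p h
        have h1 := (Prod.mk.injEq _ _ _ _ ▸ h).1
        have h2 := (Prod.mk.injEq _ _ _ _ ▸ h).2
        exact hq (by rw [← h2, h1])
      have hhead : ¬ (0 ≤ t.1 ∧ t.1 ≤ dim ∧ t.1 + t.2.1 = c) := by
        intro h; exact hq (by omega)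
      calc ((PySem.List.pyRange 0 (dim + 1) 1).map
              (fun p => (hodgeDict (t :: l)).getD (p, c - p) 0)).sum
          = ((PySem.List.pyRange 0 (dim + 1) 1).map
              (fun p => (hodgeDict l).getD (p, c - p) 0)).sum := by
            apply congrArg; apply List.map_congr_left; intro p _
            rw [hget p, if_neg (hcond p)]
        _ = _ := by rw [ih hnd']; simp [hhead]

-- B's paired fold computes the two classifying sums
lemma foldl_pair_eq_sums (l : List (Int × Int × Int)) (dim : Int) (a b : Int) :
    l.foldl (fun (acc : Int × Int) t =>
        if 0 ≤ t.1 ∧ t.1 ≤ dim then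
          if t.1 + t.2.1 = 2 then (acc.1 + t.2.2, acc.2)
          else if t.1 + t.2.1 = 3 then (acc.1, acc.2 + t.2.2)
          else acc
        else acc) (a, b)
      = (a + (l.map (fun t =>
            if 0 ≤ t.1 ∧ t.1 ≤ dim ∧ t.1 + t.2.1 = 2 then t.2.2 else 0)).sum,
         b + (l.map (fun t =>
            if 0 ≤ t.1 ∧ t.1 ≤ dim ∧ t.1 + t.2.1 = 3 then t.2.2 else 0)).sum) := by
  induction l generalizing a b with
  | nil => simp
  | cons t l ih =>
    simp only [List.foldl_cons, List.map_cons, List.sum_cons]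
    split_ifs <;> rw [ih] <;> simp only [Prod.mk.injEq] <;> constructor <;> omega

-- ===== VERDICT (by name: the statement is the Claim_ definition above) =====
theorem twisted_category_deformations_spec : Claim_equal_twisted_category_deformations := by
  intro hodge dim _ hpre
  unfold Spec_twisted_category_deformations
  unfold twisted_category_deformations twisted_category_deformations_alt
  simp only [PySem.List.foldl_add, foldl_pair_eq_sums, zero_add,
    rangeSum_eq_classify hodge 2 dim hpre, rangeSum_eq_classify hodge 3 dim hpre]
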